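-- pv_equiv track=rewrite | github.com/vlad-marlo/algorithms | school/webium/individuals/04/a.py | solution
-- ===== SOURCE A (Python) =====
-- def solution(data: list[tuple[int, str]]) -> tuple[int, int]:
--     max_len = 0
--     min_key = 0
--     for start in range(len(data)):
--         data.sort(key=lambda x: x[0], reverse=True)
--         res = [data[start]]
--         for i in data[start + 1:]:
--             if res[-1][0] - 7 >= i[0] and res[-1][1] != i[1]:
--                 res.append(i)
--         if max_len < len(res):
--             max_len = len(res)
--             min_key = res[-1][0]
--     return max_len, min_key
-- ===== SOURCE B (Python) =====
-- def solution(data: list[tuple[int, str]]) -> tuple[int, int]: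
--     # Sort once (in place, like A), then memoize each suffix's greedy chain
--     # (length, end key) back to front, instead of re-sorting and re-walking
--     # the whole chain for every start.
--     data.sort(key=lambda x: x[0], reverse=True)
--     suf = []   # elements after the current position, in order
--     tab = []   # (chain length, chain end key) for the chain starting at each position of suf
--     for x in reversed(data):
--         p = (1, x[0])
--         for y, q in zip(suf, tab):
--             if x[0] - 7 >= y[0] and x[1] != y[1]:
--                 p = (q[0] + 1, q[1])
--                 break
--         suf = [x] + suf
--         tab = [p] + tab
--     max_len = 0
--     min_key = 0
--     for l, e in tab:
--         if max_len < l: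
--             max_len = l
--             min_key = e
--     return max_len, min_key
-- ===== Notes on version B (the rewrite author's own statement) =====
-- stated objective: faster
-- what changed: Instead of re-sorting the list and re-walking the whole greedy chain for every start index, B sorts once in place and builds, back to front, a memo table of (chain length, chain end key) per suffix position, so each start reuses the already-computed chain of the first later element it links to; the final answer is one scan of that table.
import Mathlib
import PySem

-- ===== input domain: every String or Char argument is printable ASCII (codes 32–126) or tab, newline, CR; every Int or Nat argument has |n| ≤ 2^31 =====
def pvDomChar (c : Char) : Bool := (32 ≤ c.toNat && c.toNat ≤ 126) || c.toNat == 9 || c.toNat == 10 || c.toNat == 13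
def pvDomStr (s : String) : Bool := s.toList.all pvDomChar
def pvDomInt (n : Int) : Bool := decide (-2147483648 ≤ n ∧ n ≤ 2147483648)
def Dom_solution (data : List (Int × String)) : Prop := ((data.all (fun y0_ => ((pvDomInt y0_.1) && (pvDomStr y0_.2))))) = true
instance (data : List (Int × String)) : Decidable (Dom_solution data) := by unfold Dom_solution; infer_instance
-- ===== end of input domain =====

-- B sorts once and memoizes each suffix's greedy chain instead of A's re-sort-and-rescan per start;
-- equivalence is about the RETURN value only (both Pythons sort `data` in place).

-- ===== PORT A =====
-- inner loop body: 'if res[-1][0] - 7 >= i[0] and res[-1][1] != i[1]: res.append(i)'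
def aInnerStep (res : List (Int × String)) (i : Int × String) : List (Int × String) :=
  let last := (PySem.List.pyGet? res (-1)).getD (0, "")  -- res is never empty, so never the default
  if last.1 - 7 ≥ i.1 ∧ last.2 ≠ i.2 then res ++ [i] else res

-- one iteration of 'for start in range(len(data))'; state = ((max_len, min_key), data)
def aBody (st : (Int × Int) × List (Int × String)) (start : Int) : (Int × Int) × List (Int × String) :=
  let d := PySem.List.sorted st.2 (fun x => x.1) true
  let first := (PySem.List.pyGet? d start).getD (0, "")  -- start < len(d): always in range
  let res := (PySem.List.slice d (some (start + 1)) none).foldl aInnerStep [first]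
  if st.1.1 < (res.length : Int) then
    (((res.length : Int), ((PySem.List.pyGet? res (-1)).getD (0, "")).1), d)
  else (st.1, d)

def solution (data : List (Int × String)) : Int × Int :=
  ((PySem.List.pyRange 0 (data.length : Int) 1).foldl aBody ((0, 0), data)).1

-- ===== PORT B =====
-- 'for y, q in zip(suf, tab): if ...: p = (q[0] + 1, q[1]); break' starting from p = (1, x[0])
def firstMatch (x : Int × String) : List (Int × String) → List (Int × Int) → Int × Int
  | y :: ys, q :: qs =>
      if x.1 - 7 ≥ y.1 ∧ x.2 ≠ y.2 then (q.1 + 1, q.2) else firstMatch x ys qs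
  | _, _ => (1, x.1)

-- one iteration of 'for x in reversed(data)'; state = (suf, tab)
def bBuild (st : List (Int × String) × List (Int × Int)) (x : Int × String) :
    List (Int × String) × List (Int × Int) :=
  (x :: st.1, firstMatch x st.1 st.2 :: st.2)

def solution_alt (data : List (Int × String)) : Int × Int :=
  let d := PySem.List.sorted data (fun x => x.1) true
  let tab := (d.reverse.foldl bBuild ([], [])).2
  tab.foldl (fun acc p => if acc.1 < p.1 then p else acc) (0, 0)

-- ===== PRECONDITION & SPEC =====
def Spec_solution (data : List (Int × String)) (out : Int × Int) : Prop := out = solution_alt data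
instance (data : List (Int × String)) (out : Int × Int) : Decidable (Spec_solution data out) := by unfold Spec_solution; infer_instance

-- ===== CLAIM (what is proved, stated in full; the proofs are below) =====
def Claim_equal_solution : Prop := ∀ (data : List (Int × String)), Dom_solution data → Spec_solution data (solution data)

-- ===== LEMMAS AND PROOFS =====

-- (length, last element) of the greedy chain started at x over the remaining list
def gchain : (Int × String) → List (Int × String) → Nat × (Int × String)
  | x, [] => (1, x)
  | x, y :: ys =>
      if x.1 - 7 ≥ y.1 ∧ x.2 ≠ y.2 then
        let r := gchain y ys
        (r.1 + 1, r.2)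
      else gchain x ys

-- chains for every start position of a list
def gmap : List (Int × String) → List (Nat × (Int × String))
  | [] => []
  | x :: ys => gchain x ys :: gmap ys

def toP (c : Nat × (Int × String)) : Int × Int := ((c.1 : Int), c.2.1)

def selN (acc : Int × Int) (c : Nat × (Int × String)) : Int × Int :=
  if acc.1 < (c.1 : Int) then ((c.1 : Int), c.2.1) else acc

theorem firstMatch_gmap (x : Int × String) (ys : List (Int × String)) :
    firstMatch x ys ((gmap ys).map toP) = toP (gchain x ys) := by
  induction ys generalizing x with
  | nil => simp [firstMatch, gchain, toP]
  | cons y ys ih =>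
    by_cases h : x.1 - 7 ≥ y.1 ∧ x.2 ≠ y.2
    · simp [firstMatch, gchain, gmap, h, toP]
    · simp [firstMatch, gchain, gmap, h, ih]

theorem bBuild_foldr (d : List (Int × String)) :
    d.foldr (fun x st => bBuild st x) ([], []) = (d, (gmap d).map toP) := by
  induction d with
  | nil => rfl
  | cons x ys ih =>
    rw [List.foldr_cons, ih]
    simp [bBuild, gmap, firstMatch_gmap]

theorem solution_alt_eq (data : List (Int × String)) :
    solution_alt data =
      (gmap (PySem.List.sorted data (fun x => x.1) true)).foldl selN (0, 0) := by
  show (((PySem.List.sorted data (fun x => x.1) true).reverse.foldl bBuild ([], [])).2).foldl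
      (fun acc p => if acc.1 < p.1 then p else acc) (0, 0) = _
  rw [List.foldl_reverse, bBuild_foldr, List.foldl_map]
  rfl

theorem inner_fold (ys : List (Int × String)) :
    ∀ (res : List (Int × String)) (l : Int × String), res.getLast? = some l →
      (ys.foldl aInnerStep res).length + 1 = res.length + (gchain l ys).1 ∧
      (ys.foldl aInnerStep res).getLast? = some (gchain l ys).2 := by
  induction ys with
  | nil => intro res l h; simp [gchain, h]
  | cons y ys ih =>
    intro res l h
    have hres : res ≠ [] := by intro hn; simp [hn] at h
    by_cases hc : l.1 - 7 ≥ y.1 ∧ l.2 ≠ y.2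
    · have hstep : aInnerStep res y = res ++ [y] := by
        simp [aInnerStep, PySem.List.pyGet?_neg_one, h, hc]
      have := ih (res ++ [y]) y (by simp)
      rcases this with ⟨h1, h2⟩
      constructor
      · simp only [List.foldl_cons, hstep]
        rw [h1]; simp [gchain, hc]; omega
      · simp only [List.foldl_cons, hstep]
        rw [h2]; simp [gchain, hc]
    · have hstep : aInnerStep res y = res := by
        simp [aInnerStep, PySem.List.pyGet?_neg_one, h, hc]
      have := ih res l h
      rcases this with ⟨h1, h2⟩
      constructor
      · simp only [List.foldl_cons, hstep]; rw [h1]; simp [gchain, hc]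
      · simp only [List.foldl_cons, hstep]; rw [h2]; simp [gchain, hc]

theorem outer_fold (d : List (Int × String))
    (hd : PySem.List.sorted d (fun x => x.1) true = d) :
    ∀ (m k : Nat) (acc : Int × Int) (d' : List (Int × String)),
      PySem.List.sorted d' (fun x => x.1) true = d → k + m = d.length →
      ((PySem.List.pyRange (k : Int) (d.length : Int) 1).foldl aBody (acc, d')).1 =
        (gmap (d.drop k)).foldl selN acc := by
  intro m
  induction m with
  | zero =>
    intro k acc d' _ hk
    have hk' : k = d.length := by omega
    rw [PySem.List.pyRange_one_eq_nil (by omega)]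
    simp [hk', gmap]
  | succ m ih =>
    intro k acc d' hds hk
    have hklt : k < d.length := by omega
    rw [PySem.List.pyRange_one_cons (by exact_mod_cast hklt)]
    simp only [List.foldl_cons]
    have hbody : aBody (acc, d') (k : Int) = (selN acc (gchain d[k] (d.drop (k + 1))), d) := by
      unfold aBody
      simp only [hds]
      have hget : (PySem.List.pyGet? d (k : Int)).getD (0, "") = d[k] := by
        rw [PySem.List.pyGet?_natCast]
        simp [List.getElem?_eq_getElem hklt]
      have hslice : PySem.List.slice d (some ((k : Int) + 1)) none = d.drop (k + 1) := by
        have : ((k : Int) + 1) = ((k + 1 : Nat) : Int) := by push_cast; ring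
        rw [this, PySem.List.slice_from_natCast]
      rw [hget, hslice]
      obtain ⟨h1, h2⟩ := inner_fold (d.drop (k + 1)) [d[k]] d[k] (by simp)
      set res := (d.drop (k + 1)).foldl aInnerStep [d[k]] with hres
      have hlen : res.length = (gchain d[k] (d.drop (k + 1))).1 := by
        simp at h1; omega
      have hlast : (PySem.List.pyGet? res (-1)).getD (0, "") =
          (gchain d[k] (d.drop (k + 1))).2 := by
        rw [PySem.List.pyGet?_neg_one, h2]; rfl
      rw [hlen, hlast]
      unfold selN
      by_cases hlt : acc.1 < ((gchain d[k] (d.drop (k + 1))).1 : Int) <;> simp [hlt]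
    rw [hbody]
    have hdrop : d.drop k = d[k] :: d.drop (k + 1) := List.drop_eq_getElem_cons hklt
    rw [hdrop]
    simp only [gmap, List.foldl_cons]
    have := ih (k + 1) (selN acc (gchain d[k] (d.drop (k + 1)))) d hd (by omega)
    rw [← this]
    norm_num

-- ===== VERDICT (by name: the statement is the Claim_ definition above) =====
theorem solution_spec : Claim_equal_solution := by
  unfold Claim_equal_solution
  intro data _
  unfold Spec_solution
  set d := PySem.List.sorted data (fun x => x.1) true with hdset
  have hd : PySem.List.sorted d (fun x => x.1) true = d := PySem.List.sorted_rev_sorted_rev ..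
  have hlen : d.length = data.length := PySem.List.length_sorted ..
  unfold solution
  have h := outer_fold d hd d.length 0 (0, 0) data hdset.symm (by omega)
  rw [Nat.cast_zero] at h
  rw [← hlen, h, solution_alt_eq]
  rw [List.drop_zero]
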